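-- pv_equiv track=rewrite | github.com/rebesatt/disces | src/discovery.py | merge_event_arrays
-- ===== SOURCE A (Python) =====
-- def merge_event_arrays(event1:list, event2:list) -> list|None:
--     """
--         Merges to events, if no dimension has entries in both events.
--         The result is an array that contains all values <= 2*dim(event).
--
--         Example:
--         merge_event_arrays(["", "x", "", ""], ["","", "y", "z"]) == ["","x","y", "z"] (e.g. ";x;;;" + ";;y;z;" == ";x;y;z;")
--
--         Args:
--             event1, event2: of type <list> and is an event splitted by ' '.
--
--         Returns:
--             An array contaning the merged event.
--             None, if there is at least one dimension that contains values in both event1 and event2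
--
--         Raises
--             ValueError, if not both events are of type <list>!.
--             IndexError, if both events have different dimensions.
--     """
--     if not isinstance(event1, type(event2)):
--         raise ValueError("Both events have to be of type <list>!")
--     if not isinstance(event1, list):
--         raise ValueError("Both events have to be of type <list>!")
--     if not len(event1) == len(event2):
--         raise IndexError("Both events have to have the same length!")
--     merged_event = []
--     for dim, value in enumerate(event1):
--         if value == '':
--             merged_event.append(event2[dim])
--         elif event2[dim] == '':
--             merged_event.append(value)
--         else:
--             return None
--     return merged_event
-- ===== SOURCE B (Python) =====
-- def merge_event_arrays(event1:list, event2:list) -> list|None: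
--     if not isinstance(event1, type(event2)):
--         raise ValueError("Both events have to be of type <list>!")
--     if not isinstance(event1, list):
--         raise ValueError("Both events have to be of type <list>!")
--     if not len(event1) == len(event2):
--         raise IndexError("Both events have to have the same length!")
--     if any(a != '' and b != '' for a, b in zip(event1, event2)):
--         return None
--     return [b if a == '' else a for a, b in zip(event1, event2)]
-- ===== Notes on version B (the rewrite author's own statement) =====
-- stated objective: simpler
-- what changed: Replaces the fused index-based loop that both detects conflicts and appends with two separate zip passes: an any() conflict scan followed by a comprehension building the merged list.
import Mathlib
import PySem

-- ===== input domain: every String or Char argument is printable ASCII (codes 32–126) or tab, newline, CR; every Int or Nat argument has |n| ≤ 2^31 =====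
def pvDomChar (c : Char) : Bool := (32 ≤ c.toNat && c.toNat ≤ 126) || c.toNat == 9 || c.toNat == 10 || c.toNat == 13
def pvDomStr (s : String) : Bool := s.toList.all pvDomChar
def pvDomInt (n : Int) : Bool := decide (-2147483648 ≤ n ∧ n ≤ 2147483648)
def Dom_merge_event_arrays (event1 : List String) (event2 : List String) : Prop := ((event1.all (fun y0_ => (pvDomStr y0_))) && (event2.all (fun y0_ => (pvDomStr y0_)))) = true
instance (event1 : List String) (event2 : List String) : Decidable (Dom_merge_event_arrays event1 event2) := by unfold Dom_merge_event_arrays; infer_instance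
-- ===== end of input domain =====

-- B separates conflict detection (an any-scan over the zip) from result construction (a map), replacing A's fused loop; objective: simpler.

-- ===== PORT A =====
-- fused loop over enumerate(event1), indexing event2[dim]; builds merged_event by appending
def mergeGoA (event2 : List String) : List (Int × String) → List String → Option (List String)
  | [], acc => some acc
  | (dim, value) :: rest, acc =>
    if value = "" then
      match PySem.List.pyGet? event2 dim with
      | none => none          -- IndexError; unreachable under Pre_
      | some w => mergeGoA event2 rest (acc ++ [w])
    else
      match PySem.List.pyGet? event2 dim with
      | none => none          -- IndexError; unreachable under Pre_
      | some w => if w = "" then mergeGoA event2 rest (acc ++ [value]) else none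

def merge_event_arrays (event1 : List String) (event2 : List String) : Option (List String) :=
  if event1.length = event2.length then
    mergeGoA event2 (PySem.List.enumerate event1 0) []
  else none   -- Python raises IndexError here; excluded by Pre_

-- ===== PORT B =====
def merge_event_arrays_alt (event1 : List String) (event2 : List String) : Option (List String) :=
  if event1.length = event2.length then
    if (event1.zip event2).any (fun p => p.1 ≠ "" && p.2 ≠ "") then none
    else some ((event1.zip event2).map (fun p => if p.1 = "" then p.2 else p.1))
  else none   -- Python raises IndexError here; excluded by Pre_

-- ===== PRECONDITION & SPEC =====
-- Pre_ excludes exactly the inputs where Python A raises IndexError (unequal lengths).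
def Pre_merge_event_arrays (event1 : List String) (event2 : List String) : Prop :=
  event1.length = event2.length
instance (event1 : List String) (event2 : List String) : Decidable (Pre_merge_event_arrays event1 event2) := by unfold Pre_merge_event_arrays; infer_instance

def pvWitness_merge_event_arrays : List String × List String := (["", "x", "", ""], ["", "", "y", "z"])

def Spec_merge_event_arrays (event1 : List String) (event2 : List String) (out : Option (List String)) : Prop := out = merge_event_arrays_alt event1 event2
instance (event1 : List String) (event2 : List String) (out : Option (List String)) : Decidable (Spec_merge_event_arrays event1 event2 out) := by unfold Spec_merge_event_arrays; infer_instance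

-- ===== CLAIM (what is proved, stated in full; the proofs are below) =====
def Claim_equal_merge_event_arrays : Prop := ∀ (event1 : List String) (event2 : List String), Dom_merge_event_arrays event1 event2 → Pre_merge_event_arrays event1 event2 → Spec_merge_event_arrays event1 event2 (merge_event_arrays event1 event2)

-- ===== LEMMAS AND PROOFS =====

theorem mergeGoA_spec (e1 : List String) : ∀ (e2 pre acc : List String),
    e1.length = e2.length →
    mergeGoA (pre ++ e2) (PySem.List.enumerate e1 (pre.length : Int)) acc =
      (if (e1.zip e2).any (fun p => p.1 ≠ "" && p.2 ≠ "") then none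
       else some (acc ++ (e1.zip e2).map (fun p => if p.1 = "" then p.2 else p.1))) := by
  induction e1 with
  | nil =>
    intro e2 pre acc h
    cases e2 with
    | nil => simp [PySem.List.enumerate, mergeGoA]
    | cons w e2' => simp at h
  | cons v e1' ih =>
    intro e2 pre acc h
    cases e2 with
    | nil => simp at h
    | cons w e2' =>
      simp only [PySem.List.enumerate_cons, mergeGoA]
      rw [PySem.List.pyGet?_append_length]
      have hlen : (pre.length : Int) + 1 = ((pre ++ [w]).length : Int) := by simp
      have hassoc : pre ++ w :: e2' = (pre ++ [w]) ++ e2' := by simp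
      have h' : e1'.length = e2'.length := by simpa using h
      simp only [List.zip_cons_cons, List.any_cons, List.map_cons]
      by_cases hv : v = ""
      · rw [if_pos hv, hassoc, hlen, ih e2' (pre ++ [w]) (acc ++ [w]) h']
        by_cases hc : (e1'.zip e2').any (fun p => p.1 ≠ "" && p.2 ≠ "")
        all_goals simp only [ne_eq] at hc
        · rw [hc]; simp [hv]
        · simp only [Bool.not_eq_true] at hc
          rw [hc]; simp [hv]
      · rw [if_neg hv]
        by_cases hw : w = ""
        · rw [if_pos hw, hassoc, hlen, ih e2' (pre ++ [w]) (acc ++ [v]) h']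
          by_cases hc : (e1'.zip e2').any (fun p => p.1 ≠ "" && p.2 ≠ "")
          all_goals simp only [ne_eq] at hc
          · rw [hc]; simp [hw]
          · simp only [Bool.not_eq_true] at hc
            rw [hc]; simp [hv, hw]
        · rw [if_neg hw]
          simp [hv, hw]

-- ===== VERDICT (by name: the statement is the Claim_ definition above) =====
theorem merge_event_arrays_spec : Claim_equal_merge_event_arrays := by
  intro e1 e2 _ hpre
  have hlen : e1.length = e2.length := hpre
  unfold Spec_merge_event_arrays merge_event_arrays merge_event_arrays_alt
  rw [if_pos hlen, if_pos hlen]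
  have := mergeGoA_spec e1 e2 [] [] hpre
  simpa using this
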